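-- pv_equiv track=rewrite | github.com/Mrhunderb/CS61a | hws/hw04(Done)/parsons_probs/remove_odd_indices.py | remove_odd_indices
-- ===== SOURCE A (Python) =====
-- def remove_odd_indices(lst, odd):
--     """
--     Remove elements of lst that have odd indices.
--     >>> s = [1, 2, 3, 4]
--     >>> t = remove_odd_indices(s, True)
--     >>> s
--     [1, 2, 3, 4]
--     >>> t
--     [1, 3]
--     >>> l = [5, 6, 7, 8]
--     >>> m = remove_odd_indices(l, False)
--     >>> m
--     [6, 8]
--     """
--     "*** YOUR CODE HERE ***"
--     """
--     My loop solution
--     re = []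
--     if odd == True:
--         for i in lst:
--             if i % 2 != 0:
--                  re += [i]
--     else:
--         for i in lst:
--             if i % 2 == 0:
--                  re += [i]
--     return re
--     """
--     "Recursion solution"
--     if not lst:
--         return []
--     elif odd == True:
--         return [lst[0]] + remove_odd_indices(lst[1:], not odd)
--     else:
--         return remove_odd_indices(lst[1:], not odd)
-- ===== SOURCE B (Python) =====
-- def remove_odd_indices(lst, odd):
--     keep_even = (odd == True)
--     return [x for i, x in enumerate(lst) if (i % 2 == 0) == keep_even]
-- ===== Notes on version B (the rewrite author's own statement) =====
-- stated objective: faster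
-- what changed: Replaces the flag-toggling recursion over lst[1:] slices with a single iterative pass over enumerate(lst) that keeps elements by index parity.
import Mathlib
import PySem

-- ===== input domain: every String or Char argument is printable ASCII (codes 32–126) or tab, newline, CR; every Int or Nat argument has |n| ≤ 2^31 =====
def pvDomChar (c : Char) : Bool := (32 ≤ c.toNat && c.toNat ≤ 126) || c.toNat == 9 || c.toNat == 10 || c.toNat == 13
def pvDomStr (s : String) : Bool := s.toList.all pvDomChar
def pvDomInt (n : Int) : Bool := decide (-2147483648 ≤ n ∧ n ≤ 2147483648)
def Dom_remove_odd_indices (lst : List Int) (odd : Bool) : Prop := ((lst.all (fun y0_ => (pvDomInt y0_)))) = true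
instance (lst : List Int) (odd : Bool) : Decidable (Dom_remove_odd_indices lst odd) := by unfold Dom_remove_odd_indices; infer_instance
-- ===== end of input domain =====

-- ===== PORT A =====
-- Recursion on lst with the flag toggled each step, as in A.
def remove_odd_indices (lst : List Int) (odd : Bool) : List Int :=
  match lst with
  | [] => []
  | x :: rest =>
    if odd then x :: remove_odd_indices rest (!odd)
    else remove_odd_indices rest (!odd)

-- ===== PORT B =====
-- Iterative single pass: filter enumerate(lst) by index parity (B's comprehension).
def remove_odd_indices_alt (lst : List Int) (odd : Bool) : List Int :=
  let keepEven := odd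
  ((PySem.List.enumerate lst).filter (fun p => decide (p.1 % 2 = 0) == keepEven)).map (·.2)

-- ===== PRECONDITION & SPEC =====
def Spec_remove_odd_indices (lst : List Int) (odd : Bool) (out : List Int) : Prop := out = remove_odd_indices_alt lst odd
instance (lst : List Int) (odd : Bool) (out : List Int) : Decidable (Spec_remove_odd_indices lst odd out) := by unfold Spec_remove_odd_indices; infer_instance

-- ===== CLAIM (what is proved, stated in full; the proofs are below) =====
def Claim_equal_remove_odd_indices : Prop := ∀ (lst : List Int) (odd : Bool), Dom_remove_odd_indices lst odd → Spec_remove_odd_indices lst odd (remove_odd_indices lst odd)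

-- ===== LEMMAS AND PROOFS =====

-- ===== VERDICT (by name: the statement is the Claim_ definition above) =====
-- Invariant: filtering enumerate from start s equals A's recursion with flag (s even ↔ b).
theorem key (lst : List Int) : ∀ (s : Int) (b : Bool),
    ((PySem.List.enumerate lst s).filter (fun p => decide (p.1 % 2 = 0) == b)).map (·.2)
      = remove_odd_indices lst (decide (s % 2 = 0) == b) := by
  induction lst with
  | nil => intro s b; simp [PySem.List.enumerate_nil, remove_odd_indices]
  | cons x rest ih =>
    intro s b
    have hpar : decide ((s + 1) % 2 = 0) = !decide (s % 2 = 0) := by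
      by_cases h : s % 2 = 0 <;> simp [h] <;> omega
    simp only [PySem.List.enumerate_cons, List.filter_cons, remove_odd_indices]
    have ht := ih (s + 1) b
    rw [hpar] at ht
    cases b <;> cases hd : decide (s % 2 = 0) <;>
      simp only [hd] at ht ⊢ <;> simp_all

theorem remove_odd_indices_spec : Claim_equal_remove_odd_indices := by
  intro lst odd _
  unfold Spec_remove_odd_indices remove_odd_indices_alt
  have := key lst 0 odd
  simp at this
  simp [← this]
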